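-- pv_equiv track=rewrite | github.com/odenas/indexed_ms | fast_ms/tests/test_ms_slow.py | mstat_py
-- ===== SOURCE A (Python) =====
-- from typing import Iterator
--
-- def mstat_py(s, t):
--     def iter_prefixes(t: str, i: int) -> Iterator[str]:
--         """
--         Prefixes of t[i:], from longest to shortest
--         """
--
--         for j in reversed(range(i+1, len(t) + 1)):
--             yield t[i:j]
--
--     def ms(t: str, s: str, i: int) -> int:
--         """
--         the longest prefix of t[i:] that occurs in s
--         """
--
--         for prefix in iter_prefixes(t, i):
--             if prefix in s:
--                 return len(prefix)
--         return 0
--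
--     res = []
--     for i in range(len(t)):
--         res.append(str(ms(t, s, i)))
--     return " ".join(res)
-- ===== SOURCE B (Python) =====
-- def mstat_py(s, t):
--     n = len(t)
--     res = []
--     l = 0
--     for i in range(n):
--         if l > 0:
--             l -= 1
--         while i + l < n and t[i:i+l+1] in s:
--             l += 1
--         res.append(str(l))
--     return " ".join(res)
-- ===== Notes on version B (the rewrite author's own statement) =====
-- stated objective: faster
-- what changed: Replaces A's per-position rescan of all prefixes from longest to shortest by the standard two-pointer matching-statistics scan that carries the previous match length (ms[i] >= ms[i-1]-1), so the total number of substring tests drops from quadratic to linear in |t|.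
import Mathlib
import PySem

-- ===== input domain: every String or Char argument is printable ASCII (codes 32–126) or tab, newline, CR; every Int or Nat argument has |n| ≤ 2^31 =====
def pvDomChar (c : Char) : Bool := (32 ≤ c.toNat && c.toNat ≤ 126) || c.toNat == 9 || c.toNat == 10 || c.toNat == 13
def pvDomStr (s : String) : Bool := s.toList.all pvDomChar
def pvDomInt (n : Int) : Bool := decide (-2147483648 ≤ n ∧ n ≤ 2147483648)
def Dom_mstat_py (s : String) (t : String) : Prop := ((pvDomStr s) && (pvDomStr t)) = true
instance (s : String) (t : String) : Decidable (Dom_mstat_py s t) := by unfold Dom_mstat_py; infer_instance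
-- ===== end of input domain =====

-- B replaces A's per-position longest-to-shortest rescan by the amortized two-pointer
-- matching-statistics scan (ms[i] ≥ ms[i-1] - 1), reducing the number of substring tests
-- from quadratic in |t| to linear (objective: faster).

-- ===== PORT A =====
-- ms's inner scan: first prefix (longest to shortest) occurring in s, else 0
def pvGoA (s : List Char) : List (List Char) → Int
  | [] => 0
  | p :: rest => if PySem.Chars.isIn p s then (p.length : Int) else pvGoA s rest

-- ms(t, s, i): iter_prefixes(t, i) materialised, scanned in order
def pvMsA (t s : List Char) (i : Nat) : Int :=
  pvGoA s ((PySem.List.pyRange (t.length : Int) (i : Int) (-1)).map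
    (fun j => PySem.List.slice t (some (i : Int)) (some j)))

def mstat_py (s : String) (t : String) : String :=
  PySem.Str.join " "
    ((List.range t.toList.length).foldl
      (fun acc i => acc ++ [PySem.Int.toStr (pvMsA t.toList s.toList i)]) [])

-- ===== PORT B =====
-- the while loop: while i + l < n and t[i:i+l+1] in s: l += 1
def pvExtend (s t : List Char) (i l : Nat) : Nat :=
  if h : i + l < t.length ∧
      PySem.Chars.isIn (PySem.List.slice t (some (i : Int)) (some ((i : Int) + (l : Int) + 1))) s = true then
    pvExtend s t i (l + 1)
  else l
termination_by t.length - (i + l)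
decreasing_by omega

-- one iteration of B's for loop: state = (res, l)
def pvStepB (s t : List Char) (acc : List String × Nat) (i : Nat) : List String × Nat :=
  let l := acc.2
  let l := if l > 0 then l - 1 else l
  let l := pvExtend s t i l
  (acc.1 ++ [PySem.Int.toStr (l : Int)], l)

def mstat_py_alt (s : String) (t : String) : String :=
  PySem.Str.join " "
    (((List.range t.toList.length).foldl (pvStepB s.toList t.toList) ([], 0)).1)

-- ===== PRECONDITION & SPEC =====
def Spec_mstat_py (s : String) (t : String) (out : String) : Prop := out = mstat_py_alt s t
instance (s : String) (t : String) (out : String) : Decidable (Spec_mstat_py s t out) := by unfold Spec_mstat_py; infer_instance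

-- ===== CLAIM (what is proved, stated in full; the proofs are below) =====
def Claim_equal_mstat_py : Prop := ∀ (s : String) (t : String), Dom_mstat_py s t → Spec_mstat_py s t (mstat_py s t)

-- ===== LEMMAS AND PROOFS =====

-- the matching statistic at position i: greatest k ≤ |t| - i with t[i:i+k] a substring of s
def pvM (t s : List Char) (i : Nat) : Nat :=
  Nat.findGreatest (fun k => PySem.Chars.isIn ((t.drop i).take k) s = true) (t.length - i)

lemma pv_mono (s x : List Char) {a b : Nat} (h : b ≤ a)
    (ha : PySem.Chars.isIn (x.take a) s = true) : PySem.Chars.isIn (x.take b) s = true := by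
  rw [PySem.Chars.isIn_iff_infix] at *
  have hb : x.take b <+: x.take a := by
    have := List.take_prefix b (x.take a)
    rwa [List.take_take, Nat.min_eq_left h] at this
  exact hb.isInfix.trans ha

lemma pv_shift (s t : List Char) (i k : Nat)
    (h : PySem.Chars.isIn ((t.drop i).take (k + 1)) s = true) :
    PySem.Chars.isIn ((t.drop (i + 1)).take k) s = true := by
  rw [PySem.Chars.isIn_iff_infix] at *
  have hd : (((t.drop i).take (k + 1)).drop 1) <:+ ((t.drop i).take (k + 1)) :=
    List.drop_suffix _ _
  have he : (((t.drop i).take (k + 1)).drop 1) = (t.drop (i + 1)).take k := by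
    rw [List.drop_take, List.drop_drop]
    norm_num [Nat.add_comm]
  rw [he] at hd
  exact hd.isInfix.trans h

lemma pv_empty (s t : List Char) (i : Nat) :
    PySem.Chars.isIn ((t.drop i).take 0) s = true := by
  simp

-- A's inner scan computes pvM
lemma pvGoA_desc (s t : List Char) (i : Nat) : ∀ (c : Nat), i + c ≤ t.length →
    (∀ k, c < k → k ≤ t.length - i → ¬ PySem.Chars.isIn ((t.drop i).take k) s = true) →
    pvGoA s ((List.range c).map
      (fun (k : Nat) => PySem.List.slice t (some (i : Int)) (some ((i : Int) + (c : Int) - (k : Int)))))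
      = (pvM t s i : Int) := by
  intro c
  induction c with
  | zero =>
    intro _ hfail
    simp only [List.range_zero, List.map_nil]
    have h0 : pvM t s i = 0 := by
      rw [pvM, Nat.findGreatest_eq_zero_iff]
      intro k hk hk2
      exact hfail k hk hk2
    simp [h0, pvGoA]
  | succ c ih =>
    intro hc hfail
    rw [List.range_succ_eq_map, List.map_cons, List.map_map]
    have hhead : PySem.List.slice t (some (i : Int)) (some ((i : Int) + ((c + 1 : Nat) : Int) - ((0 : Nat) : Int)))
        = (t.drop i).take (c + 1) := by
      have : (i : Int) + ((c + 1 : Nat) : Int) - ((0 : Nat) : Int) = ((i + (c + 1) : Nat) : Int) := by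
        push_cast; ring
      rw [this, PySem.List.slice_natCast]
      congr 1
      omega
    rw [hhead, pvGoA]
    by_cases hin : PySem.Chars.isIn ((t.drop i).take (c + 1)) s = true
    · rw [if_pos hin]
      have hlen : ((t.drop i).take (c + 1)).length = c + 1 := by
        rw [List.length_take, List.length_drop]
        omega
      have hM : pvM t s i = c + 1 := by
        rw [pvM, Nat.findGreatest_eq_iff]
        exact ⟨by omega, fun _ => hin, fun k hk hk2 => hfail k hk hk2⟩
      rw [hlen, hM]
    · rw [if_neg hin]
      have htail : (List.range c).map
          ((fun (k : Nat) => PySem.List.slice t (some (i : Int)) (some ((i : Int) + ((c + 1 : Nat) : Int) - (k : Int)))) ∘ Nat.succ)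
          = (List.range c).map (fun (k : Nat) => PySem.List.slice t (some (i : Int)) (some ((i : Int) + (c : Int) - (k : Int)))) := by
        apply List.map_congr_left
        intro k _
        simp only [Function.comp]
        congr 2
        push_cast
        ring
      rw [htail]
      apply ih (by omega)
      intro k hk hk2
      rcases Nat.lt_or_ge c k with h1 | h1
      · by_cases hkc : k = c + 1
        · rw [hkc]; exact hin
        · exact hfail k (by omega) hk2
      · omega

lemma pvMsA_eq (s t : List Char) (i : Nat) (hi : i ≤ t.length) :
    pvMsA t s i = (pvM t s i : Int) := by
  unfold pvMsA
  rw [PySem.List.pyRange_neg_one]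
  have hc : ((t.length : Int) - (i : Int)).toNat = t.length - i := by omega
  rw [hc, List.map_map]
  have hlist : (List.range (t.length - i)).map
      ((fun j => PySem.List.slice t (some (i : Int)) (some j)) ∘ (fun k : Nat => (t.length : Int) - (k : Nat)))
      = (List.range (t.length - i)).map
        (fun (k : Nat) => PySem.List.slice t (some (i : Int)) (some (((i : Nat) : Int) + ((t.length - i : Nat) : Int) - (k : Int)))) := by
    apply List.map_congr_left
    intro k _
    simp only [Function.comp]
    congr 2
    omega
  rw [hlist]
  exact pvGoA_desc s t i (t.length - i) (by omega) (fun k hk hk2 => absurd hk2 (by omega))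

-- stopping condition of B's while loop pins the matching statistic
lemma pvStop (s t : List Char) (i l : Nat) (hl : l ≤ t.length - i)
    (hq : PySem.Chars.isIn ((t.drop i).take l) s = true)
    (hstop : i + l < t.length → ¬ PySem.Chars.isIn ((t.drop i).take (l + 1)) s = true) :
    pvM t s i = l := by
  rw [pvM, Nat.findGreatest_eq_iff]
  refine ⟨hl, fun _ => hq, ?_⟩
  intro k hk hk2 hqk
  by_cases hil : i + l < t.length
  · exact hstop hil (pv_mono s (t.drop i) (by omega) hqk)
  · omega

-- B's while loop reaches pvM from any sound start
lemma pvExtend_eq (s t : List Char) (i : Nat) : ∀ (m l : Nat), t.length - (i + l) ≤ m →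
    l ≤ t.length - i → i ≤ t.length →
    PySem.Chars.isIn ((t.drop i).take l) s = true →
    pvExtend s t i l = pvM t s i := by
  intro m
  induction m with
  | zero =>
    intro l hm hl hi hq
    rw [pvExtend, dif_neg (by intro hcond; omega)]
    exact (pvStop s t i l hl hq (fun hil _ => by omega)).symm
  | succ m ih =>
    intro l hm hl hi hq
    rw [pvExtend]
    by_cases hcond : i + l < t.length ∧
        PySem.Chars.isIn (PySem.List.slice t (some (i : Int)) (some ((i : Int) + (l : Int) + 1))) s = true
    · rw [dif_pos hcond]
      have hq' : PySem.Chars.isIn ((t.drop i).take (l + 1)) s = true := by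
        have hb : (i : Int) + (l : Int) + 1 = ((i + l + 1 : Nat) : Int) := by push_cast; ring
        have := hcond.2
        rw [hb, PySem.List.slice_natCast] at this
        have he : i + l + 1 - i = l + 1 := by omega
        rwa [he] at this
      exact ih (l + 1) (by omega) (by omega) hi hq'
    · rw [dif_neg hcond]
      refine (pvStop s t i l hl hq ?_).symm
      intro hil hq1
      apply hcond
      refine ⟨hil, ?_⟩
      have hb : (i : Int) + (l : Int) + 1 = ((i + l + 1 : Nat) : Int) := by push_cast; ring
      rw [hb, PySem.List.slice_natCast]
      have he : i + l + 1 - i = l + 1 := by omega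
      rwa [he]

-- B's fold invariant
lemma pvFoldB (s t : List Char) : ∀ (m : Nat), m ≤ t.length →
    (List.range m).foldl (pvStepB s t) ([], 0) =
      ((List.range m).map (fun i => PySem.Int.toStr ((pvM t s i : Int))),
       if m = 0 then 0 else pvM t s (m - 1)) := by
  intro m
  induction m with
  | zero => intro _; simp
  | succ m ih =>
    intro hm
    rw [List.range_succ, List.foldl_append, ih (by omega), List.map_append,
        List.foldl_cons, List.foldl_nil, List.map_cons, List.map_nil]
    have hprev : PySem.Chars.isIn ((t.drop m).take
        (if (if m = 0 then 0 else pvM t s (m - 1)) > 0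
         then (if m = 0 then 0 else pvM t s (m - 1)) - 1
         else (if m = 0 then 0 else pvM t s (m - 1)))) s = true ∧
        (if (if m = 0 then 0 else pvM t s (m - 1)) > 0
         then (if m = 0 then 0 else pvM t s (m - 1)) - 1
         else (if m = 0 then 0 else pvM t s (m - 1))) ≤ t.length - m := by
      by_cases hm0 : m = 0
      · subst hm0
        norm_num
      · simp only [if_neg hm0]
        by_cases hp : pvM t s (m - 1) > 0
        · rw [if_pos hp]
          have hspec := (Nat.findGreatest_eq_iff.mp (rfl :
            Nat.findGreatest (fun k => PySem.Chars.isIn ((t.drop (m - 1)).take k) s = true)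
              (t.length - (m - 1)) = pvM t s (m - 1)))
          have harg : pvM t s (m - 1) ≠ 0 := by omega
          have hq1 : PySem.Chars.isIn ((t.drop (m - 1)).take (pvM t s (m - 1))) s = true :=
            hspec.2.1 harg
          have hle : pvM t s (m - 1) ≤ t.length - (m - 1) := hspec.1
          constructor
          · have := pv_shift s t (m - 1) (pvM t s (m - 1) - 1)
            have heq : pvM t s (m - 1) - 1 + 1 = pvM t s (m - 1) := by omega
            have heq2 : m - 1 + 1 = m := by omega
            rw [heq, heq2] at this
            exact this hq1
          · omega
        · have h0 : pvM t s (m - 1) = 0 := by omega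
          rw [if_neg hp, h0]
          exact ⟨pv_empty s t m, by omega⟩
    have hext : pvExtend s t m
        (if (if m = 0 then 0 else pvM t s (m - 1)) > 0
         then (if m = 0 then 0 else pvM t s (m - 1)) - 1
         else (if m = 0 then 0 else pvM t s (m - 1))) = pvM t s m :=
      pvExtend_eq s t m t.length _ (by omega) hprev.2 (by omega) hprev.1
    simp only [pvStepB, hext]
    simp

-- ===== VERDICT (by name: the statement is the Claim_ definition above) =====
theorem mstat_py_spec : Claim_equal_mstat_py := by
  intro s t _
  unfold Spec_mstat_py mstat_py mstat_py_alt
  rw [PySem.List.foldl_append_singleton_eq_map, pvFoldB s.toList t.toList _ le_rfl]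
  simp only [List.nil_append]
  congr 1
  exact List.map_congr_left (fun i hi => by
    rw [pvMsA_eq s.toList t.toList i (le_of_lt (List.mem_range.mp hi))])
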